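-- pv_equiv track=rewrite | github.com/Lucenx9/agentinit | agentinit/_project_detect.py | _run_detect_conventions
-- ===== SOURCE A (Python) =====
-- def _run_detect_conventions(project_content, conventions_content):
--     """Fill conventions placeholders with stack-aware defaults."""
--     lower = project_content.lower()
--     is_python = "- **language(s):** python" in lower
--     has_fastapi = "fastapi" in lower
--     if not is_python:
--         return conventions_content
--
--     replacements = {
--         "- **Formatting standard:** (not configured)": "- **Formatting standard:** Ruff (`ruff check .` + `ruff format .`)",
--         "- **Commenting expectations:** (not configured)": "- **Commenting expectations:** Docstrings for public modules and API surface; comments only for non-obvious decisions.",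
--         "- **Files/directories:** (not configured)": "- **Files/directories:** `snake_case` for files/modules, grouped by feature/domain.",
--         "- **Variables/functions/types:** (not configured)": "- **Variables/functions/types:** `snake_case` for variables/functions, `PascalCase` for classes, `UPPER_SNAKE_CASE` for constants.",
--         "- **Branch naming:** (not configured)": "- **Branch naming:** `feature/<scope>`, `fix/<scope>`, `chore/<scope>`.",
--         "- **Required test types:** (not configured)": "- **Required test types:** Unit tests with `pytest`; add integration/API tests for behavior-critical flows.",
--         "- **Minimum coverage/gates:** (not configured)": "- **Minimum coverage/gates:** Tests must pass in CI before merge.",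
--         "- **Test data/fixtures:** (not configured)": "- **Test data/fixtures:** Reuse fixtures from `tests/conftest.py`; keep fixture scope minimal.",
--         "- **Commit message format:** (not configured)": "- **Commit message format:** Conventional Commits (`feat:`, `fix:`, `chore:`).",
--         "- **PR requirements/reviews:** (not configured)": "- **PR requirements/reviews:** Green CI and at least one reviewer approval.",
--         "- **Merge strategy:** (not configured)": "- **Merge strategy:** Squash merge.",
--     }
--     if has_fastapi:
--         replacements["- **Required test types:** (not configured)"] = (
--             "- **Required test types:** Unit tests with `pytest` plus API integration tests for endpoints."
--         )
--
--     updated = conventions_content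
--     for old, new in replacements.items():
--         updated = updated.replace(old, new)
--     return updated
-- ===== SOURCE B (Python) =====
-- def _run_detect_conventions(project_content, conventions_content):
--     """Fill conventions placeholders with stack-aware defaults (single-pass scan)."""
--     lower = project_content.lower()
--     if "- **language(s):** python" not in lower:
--         return conventions_content
--
--     test_types = (
--         "- **Required test types:** Unit tests with `pytest` plus API integration tests for endpoints."
--         if "fastapi" in lower
--         else "- **Required test types:** Unit tests with `pytest`; add integration/API tests for behavior-critical flows."
--     )
--     table = [
--         ("- **Formatting standard:** (not configured)", "- **Formatting standard:** Ruff (`ruff check .` + `ruff format .`)"),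
--         ("- **Commenting expectations:** (not configured)", "- **Commenting expectations:** Docstrings for public modules and API surface; comments only for non-obvious decisions."),
--         ("- **Files/directories:** (not configured)", "- **Files/directories:** `snake_case` for files/modules, grouped by feature/domain."),
--         ("- **Variables/functions/types:** (not configured)", "- **Variables/functions/types:** `snake_case` for variables/functions, `PascalCase` for classes, `UPPER_SNAKE_CASE` for constants."),
--         ("- **Branch naming:** (not configured)", "- **Branch naming:** `feature/<scope>`, `fix/<scope>`, `chore/<scope>`."),
--         ("- **Required test types:** (not configured)", test_types),
--         ("- **Minimum coverage/gates:** (not configured)", "- **Minimum coverage/gates:** Tests must pass in CI before merge."),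
--         ("- **Test data/fixtures:** (not configured)", "- **Test data/fixtures:** Reuse fixtures from `tests/conftest.py`; keep fixture scope minimal."),
--         ("- **Commit message format:** (not configured)", "- **Commit message format:** Conventional Commits (`feat:`, `fix:`, `chore:`)."),
--         ("- **PR requirements/reviews:** (not configured)", "- **PR requirements/reviews:** Green CI and at least one reviewer approval."),
--         ("- **Merge strategy:** (not configured)", "- **Merge strategy:** Squash merge."),
--     ]
--
--     pieces = []
--     i = 0
--     n = len(conventions_content)
--     while i < n:
--         for old, new in table:
--             if conventions_content.startswith(old, i):
--                 pieces.append(new)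
--                 i += len(old)
--                 break
--         else:
--             pieces.append(conventions_content[i])
--             i += 1
--     return "".join(pieces)
-- ===== Notes on version B (the rewrite author's own statement) =====
-- stated objective: alternative
-- what changed: A runs eleven sequential full-string str.replace passes over the conventions text; B makes a single left-to-right first-match scan over the text against the replacement table, emitting each replacement (or character) exactly once.
import Mathlib
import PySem

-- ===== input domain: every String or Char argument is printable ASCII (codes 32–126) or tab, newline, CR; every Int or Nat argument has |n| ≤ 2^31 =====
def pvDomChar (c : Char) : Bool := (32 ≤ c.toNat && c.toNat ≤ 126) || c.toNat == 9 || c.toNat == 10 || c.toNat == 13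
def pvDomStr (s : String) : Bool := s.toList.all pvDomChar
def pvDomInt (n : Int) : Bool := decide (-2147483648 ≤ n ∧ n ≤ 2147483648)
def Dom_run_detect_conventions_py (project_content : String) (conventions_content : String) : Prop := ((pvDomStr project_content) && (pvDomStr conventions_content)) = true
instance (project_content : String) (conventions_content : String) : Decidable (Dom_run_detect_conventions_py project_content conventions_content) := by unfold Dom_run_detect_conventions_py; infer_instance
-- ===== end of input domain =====

-- B replaces A's eleven sequential full-string `.replace` passes by ONE left-to-right
-- first-match table scan over the text (objective: alternative single-pass algorithm; same results).

-- ===== PORT A =====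
def run_detect_conventions_py (project_content : String) (conventions_content : String) : String :=
  let lower := PySem.Str.lower project_content
  let is_python := PySem.Str.isIn "- **language(s):** python" lower
  let has_fastapi := PySem.Str.isIn "fastapi" lower
  if !is_python then conventions_content
  else
    let replacements : PySem.Dict String String := PySem.Dict.mk [
    ("- **Formatting standard:** (not configured)", "- **Formatting standard:** Ruff (`ruff check .` + `ruff format .`)"),
    ("- **Commenting expectations:** (not configured)", "- **Commenting expectations:** Docstrings for public modules and API surface; comments only for non-obvious decisions."),
    ("- **Files/directories:** (not configured)", "- **Files/directories:** `snake_case` for files/modules, grouped by feature/domain."),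
    ("- **Variables/functions/types:** (not configured)", "- **Variables/functions/types:** `snake_case` for variables/functions, `PascalCase` for classes, `UPPER_SNAKE_CASE` for constants."),
    ("- **Branch naming:** (not configured)", "- **Branch naming:** `feature/<scope>`, `fix/<scope>`, `chore/<scope>`."),
    ("- **Required test types:** (not configured)", "- **Required test types:** Unit tests with `pytest`; add integration/API tests for behavior-critical flows."),
    ("- **Minimum coverage/gates:** (not configured)", "- **Minimum coverage/gates:** Tests must pass in CI before merge."),
    ("- **Test data/fixtures:** (not configured)", "- **Test data/fixtures:** Reuse fixtures from `tests/conftest.py`; keep fixture scope minimal."),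
    ("- **Commit message format:** (not configured)", "- **Commit message format:** Conventional Commits (`feat:`, `fix:`, `chore:`)."),
    ("- **PR requirements/reviews:** (not configured)", "- **PR requirements/reviews:** Green CI and at least one reviewer approval."),
    ("- **Merge strategy:** (not configured)", "- **Merge strategy:** Squash merge.")]
    let replacements := if has_fastapi then replacements.insert "- **Required test types:** (not configured)" "- **Required test types:** Unit tests with `pytest` plus API integration tests for endpoints." else replacements
    replacements.items.foldl (fun updated p => PySem.Str.replace updated p.1 p.2) conventions_content

-- ===== PORT B =====
-- B-side helper: the single left-to-right scan of Source B's while-loop (first table entry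
-- matching at the current position is emitted; otherwise the character is copied).
def pvScan (table : List (List Char × List Char)) : List Char → List Char
  | [] => []
  | c :: rest =>
    match table.find? (fun p => p.1.isPrefixOf (c :: rest)) with
    | some p => p.2 ++ pvScan table (rest.drop (p.1.length - 1))
    | none => c :: pvScan table rest
termination_by cs => cs.length
decreasing_by
  · simp only [List.length_cons, List.length_drop]; omega
  · simp only [List.length_cons]; omega

def run_detect_conventions_py_alt (project_content : String) (conventions_content : String) : String :=
  let lower := PySem.Str.lower project_content
  if !(PySem.Str.isIn "- **language(s):** python" lower) then conventions_content
  else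
    let test_types : String :=
      if PySem.Str.isIn "fastapi" lower then "- **Required test types:** Unit tests with `pytest` plus API integration tests for endpoints."
      else "- **Required test types:** Unit tests with `pytest`; add integration/API tests for behavior-critical flows."
    let table : List (List Char × List Char) := [
      ("- **Formatting standard:** (not configured)".toList, "- **Formatting standard:** Ruff (`ruff check .` + `ruff format .`)".toList),
      ("- **Commenting expectations:** (not configured)".toList, "- **Commenting expectations:** Docstrings for public modules and API surface; comments only for non-obvious decisions.".toList),
      ("- **Files/directories:** (not configured)".toList, "- **Files/directories:** `snake_case` for files/modules, grouped by feature/domain.".toList),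
      ("- **Variables/functions/types:** (not configured)".toList, "- **Variables/functions/types:** `snake_case` for variables/functions, `PascalCase` for classes, `UPPER_SNAKE_CASE` for constants.".toList),
      ("- **Branch naming:** (not configured)".toList, "- **Branch naming:** `feature/<scope>`, `fix/<scope>`, `chore/<scope>`.".toList),
      ("- **Required test types:** (not configured)".toList, test_types.toList),
      ("- **Minimum coverage/gates:** (not configured)".toList, "- **Minimum coverage/gates:** Tests must pass in CI before merge.".toList),
      ("- **Test data/fixtures:** (not configured)".toList, "- **Test data/fixtures:** Reuse fixtures from `tests/conftest.py`; keep fixture scope minimal.".toList),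
      ("- **Commit message format:** (not configured)".toList, "- **Commit message format:** Conventional Commits (`feat:`, `fix:`, `chore:`).".toList),
      ("- **PR requirements/reviews:** (not configured)".toList, "- **PR requirements/reviews:** Green CI and at least one reviewer approval.".toList),
      ("- **Merge strategy:** (not configured)".toList, "- **Merge strategy:** Squash merge.".toList)]
    String.ofList (pvScan table conventions_content.toList)

-- ===== PRECONDITION & SPEC =====
def Spec_run_detect_conventions_py (project_content : String) (conventions_content : String) (out : String) : Prop := out = run_detect_conventions_py_alt project_content conventions_content
instance (project_content : String) (conventions_content : String) (out : String) : Decidable (Spec_run_detect_conventions_py project_content conventions_content out) := by unfold Spec_run_detect_conventions_py; infer_instance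

-- ===== CLAIM (what is proved, stated in full; the proofs are below) =====
def Claim_equal_run_detect_conventions_py : Prop := ∀ (project_content : String) (conventions_content : String), Dom_run_detect_conventions_py project_content conventions_content → Spec_run_detect_conventions_py project_content conventions_content (run_detect_conventions_py project_content conventions_content)

-- ===== LEMMAS AND PROOFS =====


-- `a` and `b` match neither way around: neither is a prefix of the other.
def pvIncomp (a b : List Char) : Bool := !(a.isPrefixOf b) && !(b.isPrefixOf a)

-- The replacement table at the character level (`tt` = the test-types value in force).
def pvTab (tt : List Char) : List (List Char × List Char) := [
  (['-', ' ', '*', '*', 'F', 'o', 'r', 'm', 'a', 't', 't', 'i', 'n', 'g', ' ', 's', 't', 'a', 'n', 'd', 'a', 'r', 'd', ':', '*', '*', ' ', '(', 'n', 'o', 't', ' ', 'c', 'o', 'n', 'f', 'i', 'g', 'u', 'r', 'e', 'd', ')'], ['-', ' ', '*', '*', 'F', 'o', 'r', 'm', 'a', 't', 't', 'i', 'n', 'g', ' ', 's', 't', 'a', 'n', 'd', 'a', 'r', 'd', ':', '*', '*', ' ', 'R', 'u', 'f', 'f', ' ', '(', '`', 'r', 'u', 'f', 'f', ' ', 'c',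 'h', 'e', 'c', 'k', ' ', '.', '`', ' ', '+', ' ', '`', 'r', 'u', 'f', 'f', ' ', 'f', 'o', 'r', 'm', 'a', 't', ' ', '.', '`', ')']),
  (['-', ' ', '*', '*', 'C', 'o', 'm', 'm', 'e', 'n', 't', 'i', 'n', 'g', ' ', 'e', 'x', 'p', 'e', 'c', 't', 'a', 't', 'i', 'o', 'n', 's', ':', '*', '*', ' ', '(', 'n', 'o', 't', ' ', 'c', 'o', 'n', 'f', 'i', 'g', 'u', 'r', 'e', 'd', ')'], ['-', ' ', '*', '*', 'C', 'o', 'm', 'm', 'e', 'n', 't', 'i', 'n', 'g', ' ', 'e', 'x', 'p', 'e', 'c', 't', 'a', 't', 'i', 'o', 'n', 's', ':', '*', '*', ' ', 'D', 'o', 'c', 's', 't', 'r', 'i', 'n', 'g', 's', ' ', 'f', 'o', 'r', ' ', 'p', 'u', 'b', 'l', 'i', 'c', ' ', 'm', 'o', 'd', 'u', 'l', 'e', 's', ' ', 'a', 'n', 'd', ' ', 'A', 'P', 'I', ' ', 's', 'u', 'r', 'f', 'a', 'c', 'e', ';', ' ', 'c', 'o', 'm', 'm', 'e', 'n', 't',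 's', ' ', 'o', 'n', 'l', 'y', ' ', 'f', 'o', 'r', ' ', 'n', 'o', 'n', '-', 'o', 'b', 'v', 'i', 'o', 'u', 's', ' ', 'd', 'e', 'c', 'i', 's', 'i', 'o', 'n', 's', '.']),
  (['-', ' ', '*', '*', 'F', 'i', 'l', 'e', 's', '/', 'd', 'i', 'r', 'e', 'c', 't', 'o', 'r', 'i', 'e', 's', ':', '*', '*', ' ', '(', 'n', 'o', 't', ' ', 'c', 'o', 'n', 'f', 'i', 'g', 'u', 'r', 'e', 'd', ')'], ['-', ' ', '*', '*', 'F', 'i', 'l', 'e', 's', '/', 'd', 'i', 'r', 'e', 'c', 't', 'o', 'r', 'i', 'e', 's', ':', '*', '*', ' ', '`', 's', 'n', 'a', 'k', 'e', '_', 'c', 'a', 's', 'e', '`', ' ', 'f', 'o', 'r', ' ', 'f', 'i', 'l', 'e', 's', '/', 'm', 'o', 'd', 'u', 'l', 'e', 's', ',', ' ', 'g', 'r', 'o', 'u', 'p', 'e', 'd', ' ', 'b', 'y', ' ', 'f', 'e', 'a', 't', 'u', 'r', 'e', '/', 'd', 'o', 'm', 'a', 'i', 'n', '.']),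
  (['-', ' ', '*', '*', 'V', 'a', 'r', 'i', 'a', 'b', 'l', 'e', 's', '/', 'f', 'u', 'n', 'c', 't', 'i', 'o', 'n', 's', '/', 't', 'y', 'p', 'e', 's', ':', '*', '*', ' ', '(', 'n', 'o', 't', ' ', 'c', 'o', 'n', 'f', 'i', 'g', 'u', 'r', 'e', 'd', ')'], ['-', ' ', '*', '*', 'V', 'a', 'r', 'i', 'a', 'b', 'l', 'e', 's', '/', 'f', 'u', 'n', 'c', 't', 'i', 'o', 'n', 's', '/', 't', 'y', 'p', 'e', 's', ':', '*', '*', ' ', '`', 's', 'n', 'a', 'k', 'e', '_', 'c', 'a', 's', 'e', '`', ' ', 'f', 'o', 'r', ' ', 'v', 'a', 'r', 'i', 'a', 'b', 'l', 'e', 's', '/', 'f', 'u', 'n', 'c', 't', 'i', 'o', 'n', 's', ',', ' ', '`', 'P', 'a', 's', 'c', 'a', 'l', 'C', 'a', 's', 'e', '`', ' ', 'f', 'o', 'r', ' ', 'c', 'l', 'a', 's', 's', 'e', 's', ',', ' ', '`', 'U', 'P', 'P', 'E', 'R', '_', 'S', 'N', 'A', 'K', 'E', '_', 'C', 'A', 'S',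 'E', '`', ' ', 'f', 'o', 'r', ' ', 'c', 'o', 'n', 's', 't', 'a', 'n', 't', 's', '.']),
  (['-', ' ', '*', '*', 'B', 'r', 'a', 'n', 'c', 'h', ' ', 'n', 'a', 'm', 'i', 'n', 'g', ':', '*', '*', ' ', '(', 'n', 'o', 't', ' ', 'c', 'o', 'n', 'f', 'i', 'g', 'u', 'r', 'e', 'd', ')'], ['-', ' ', '*', '*', 'B', 'r', 'a', 'n', 'c', 'h', ' ', 'n', 'a', 'm', 'i', 'n', 'g', ':', '*', '*', ' ', '`', 'f', 'e', 'a', 't', 'u', 'r', 'e', '/', '<', 's', 'c', 'o', 'p', 'e', '>', '`', ',', ' ', '`', 'f', 'i', 'x', '/', '<', 's', 'c', 'o', 'p', 'e', '>', '`', ',', ' ', '`', 'c', 'h', 'o', 'r', 'e', '/', '<', 's', 'c', 'o', 'p', 'e', '>', '`', '.']),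
  (['-', ' ', '*', '*', 'R', 'e', 'q', 'u', 'i', 'r', 'e', 'd', ' ', 't', 'e', 's', 't', ' ', 't', 'y', 'p', 'e', 's', ':', '*', '*', ' ', '(', 'n', 'o', 't', ' ', 'c', 'o', 'n', 'f', 'i', 'g', 'u', 'r', 'e', 'd', ')'], tt),
  (['-', ' ', '*', '*', 'M', 'i', 'n', 'i', 'm', 'u', 'm', ' ', 'c', 'o', 'v', 'e', 'r', 'a', 'g', 'e', '/', 'g', 'a', 't', 'e', 's', ':', '*', '*', ' ', '(', 'n', 'o', 't', ' ', 'c', 'o', 'n', 'f', 'i', 'g', 'u', 'r', 'e', 'd', ')'], ['-', ' ', '*', '*', 'M', 'i', 'n', 'i', 'm', 'u', 'm', ' ', 'c', 'o', 'v', 'e', 'r', 'a', 'g', 'e', '/', 'g', 'a', 't', 'e', 's', ':', '*', '*', ' ', 'T', 'e', 's', 't', 's', ' ', 'm', 'u', 's', 't', ' ', 'p', 'a', 's', 's', ' ', 'i', 'n', ' ', 'C', 'I', ' ', 'b', 'e', 'f', 'o', 'r', 'e', ' ', 'm', 'e', 'r', 'g', 'e', '.']),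
  (['-', ' ', '*', '*', 'T', 'e', 's', 't', ' ', 'd', 'a', 't', 'a', '/', 'f', 'i', 'x', 't', 'u', 'r', 'e', 's', ':', '*', '*', ' ', '(', 'n', 'o', 't', ' ', 'c', 'o', 'n', 'f', 'i', 'g', 'u', 'r', 'e', 'd', ')'], ['-', ' ', '*', '*', 'T', 'e', 's', 't', ' ', 'd', 'a', 't', 'a', '/', 'f', 'i', 'x', 't', 'u', 'r', 'e', 's', ':', '*', '*', ' ', 'R', 'e', 'u', 's', 'e', ' ', 'f', 'i', 'x', 't', 'u', 'r', 'e', 's', ' ', 'f', 'r', 'o', 'm', ' ', '`', 't', 'e', 's', 't', 's', '/', 'c', 'o', 'n', 'f', 't', 'e', 's', 't', '.', 'p', 'y', '`', ';', ' ', 'k', 'e', 'e', 'p', ' ', 'f', 'i', 'x', 't', 'u', 'r', 'e', ' ', 's', 'c', 'o', 'p', 'e', ' ', 'm', 'i', 'n', 'i', 'm', 'a', 'l', '.']),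
  (['-', ' ', '*', '*', 'C', 'o', 'm', 'm', 'i', 't', ' ', 'm', 'e', 's', 's', 'a', 'g', 'e', ' ', 'f', 'o', 'r', 'm', 'a', 't', ':', '*', '*', ' ', '(', 'n', 'o', 't', ' ', 'c', 'o', 'n', 'f', 'i', 'g', 'u', 'r', 'e', 'd', ')'], ['-', ' ', '*', '*', 'C', 'o', 'm', 'm', 'i', 't', ' ', 'm', 'e', 's', 's', 'a', 'g', 'e', ' ', 'f', 'o', 'r', 'm', 'a', 't', ':', '*', '*', ' ', 'C', 'o', 'n', 'v', 'e', 'n', 't', 'i', 'o', 'n', 'a', 'l', ' ', 'C', 'o', 'm', 'm', 'i', 't', 's', ' ', '(', '`', 'f', 'e', 'a', 't', ':', '`', ',', ' ', '`', 'f', 'i', 'x', ':', '`', ',', ' ', '`', 'c', 'h', 'o', 'r', 'e', ':', '`', ')', '.']),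
  (['-', ' ', '*', '*', 'P', 'R', ' ', 'r', 'e', 'q', 'u', 'i', 'r', 'e', 'm', 'e', 'n', 't', 's', '/', 'r', 'e', 'v', 'i', 'e', 'w', 's', ':', '*', '*', ' ', '(', 'n', 'o', 't', ' ', 'c', 'o', 'n', 'f', 'i', 'g', 'u', 'r', 'e', 'd', ')'], ['-', ' ', '*', '*', 'P', 'R', ' ', 'r', 'e', 'q', 'u', 'i', 'r', 'e', 'm', 'e', 'n', 't', 's', '/', 'r', 'e', 'v', 'i', 'e', 'w', 's', ':', '*', '*', ' ', 'G', 'r', 'e', 'e', 'n', ' ', 'C', 'I', ' ', 'a', 'n', 'd', ' ', 'a', 't', ' ', 'l', 'e', 'a', 's', 't', ' ', 'o', 'n', 'e', ' ', 'r', 'e', 'v', 'i', 'e', 'w', 'e', 'r', ' ', 'a', 'p', 'p', 'r', 'o', 'v', 'a', 'l', '.']),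
  (['-', ' ', '*', '*', 'M', 'e', 'r', 'g', 'e', ' ', 's', 't', 'r', 'a', 't', 'e', 'g', 'y', ':', '*', '*', ' ', '(', 'n', 'o', 't', ' ', 'c', 'o', 'n', 'f', 'i', 'g', 'u', 'r', 'e', 'd', ')'], ['-', ' ', '*', '*', 'M', 'e', 'r', 'g', 'e', ' ', 's', 't', 'r', 'a', 't', 'e', 'g', 'y', ':', '*', '*', ' ', 'S', 'q', 'u', 'a', 's', 'h', ' ', 'm', 'e', 'r', 'g', 'e', '.'])]
def pvTtN : List Char := ['-', ' ', '*', '*', 'R', 'e', 'q', 'u', 'i', 'r', 'e', 'd', ' ', 't', 'e', 's', 't', ' ', 't', 'y', 'p', 'e', 's', ':', '*', '*', ' ', 'U', 'n', 'i', 't', ' ', 't', 'e', 's', 't', 's', ' ', 'w', 'i', 't', 'h', ' ', '`', 'p', 'y', 't', 'e', 's', 't', '`', ';', ' ', 'a', 'd', 'd', ' ', 'i', 'n', 't', 'e', 'g', 'r', 'a', 't', 'i', 'o', 'n', '/', 'A', 'P', 'I', ' ', 't', 'e', 's', 't', 's', ' ', 'f', 'o', 'r', ' ', 'b', 'e', 'h',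 'a', 'v', 'i', 'o', 'r', '-', 'c', 'r', 'i', 't', 'i', 'c', 'a', 'l', ' ', 'f', 'l', 'o', 'w', 's', '.']
def pvTtF : List Char := ['-', ' ', '*', '*', 'R', 'e', 'q', 'u', 'i', 'r', 'e', 'd', ' ', 't', 'e', 's', 't', ' ', 't', 'y', 'p', 'e', 's', ':', '*', '*', ' ', 'U', 'n', 'i', 't', ' ', 't', 'e', 's', 't', 's', ' ', 'w', 'i', 't', 'h', ' ', '`', 'p', 'y', 't', 'e', 's', 't', '`', ' ', 'p', 'l', 'u', 's', ' ', 'A', 'P', 'I', ' ', 'i', 'n', 't', 'e', 'g', 'r', 'a', 't', 'i', 'o', 'n', ' ', 't', 'e', 's', 't', 's', ' ', 'f', 'o', 'r', ' ', 'e', 'n', 'd', 'p', 'o', 'i', 'n', 't', 's', '.']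

-- Non-interference facts about a table: nonempty keys and values, distinct keys,
-- no value is a key, and no nonempty tail of any key/value can begin an occurrence
-- of a key (except a key beginning itself).
def pvGood (T : List (List Char × List Char)) : Prop :=
  (∀ p ∈ T, p.1 ≠ []) ∧
  (∀ p ∈ T, p.2 ≠ []) ∧
  ((T.map Prod.fst).Nodup) ∧
  (∀ v ∈ T.map Prod.snd, ∀ k ∈ T.map Prod.fst, v ≠ k) ∧
  (∀ x ∈ T.map Prod.fst ++ T.map Prod.snd, ∀ s ∈ x.tails, s ≠ [] →
     ∀ k ∈ T.map Prod.fst, ((s = x ∧ x = k) ∨ pvIncomp s k = true)) ∧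
  (∀ k ∈ T.map Prod.fst, ∀ s ∈ k.tails, s ≠ [] → s ≠ k →
     ∀ x ∈ T.map Prod.fst ++ T.map Prod.snd, pvIncomp s x = true)

-- A's `updated.replace(old, new)` restated as the structural recursion it performs.
def pvRep (old new : List Char) : List Char → List Char
  | [] => []
  | c :: t =>
    if old.isPrefixOf (c :: t) then new ++ pvRep old new (t.drop (old.length - 1))
    else c :: pvRep old new t
termination_by l => l.length
decreasing_by
  · simp only [List.length_cons, List.length_drop]; omega
  · simp only [List.length_cons]; omega

-- The scan, generalized: keys in `Skeys` render as their value, the others as themselves.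
def pvRSub (T : List (List Char × List Char)) (Skeys : List (List Char)) : List Char → List Char
  | [] => []
  | c :: rest =>
    match T.find? (fun p => p.1.isPrefixOf (c :: rest)) with
    | some q => (if q.1 ∈ Skeys then q.2 else q.1) ++ pvRSub T Skeys (rest.drop (q.1.length - 1))
    | none => c :: pvRSub T Skeys rest
termination_by cs => cs.length
decreasing_by
  · simp only [List.length_cons, List.length_drop]; omega
  · simp only [List.length_cons]; omega

lemma pvRep_nil (old new : List Char) : pvRep old new [] = [] := by
  rw [pvRep]

lemma pvRep_cons_pos (old new : List Char) (c : Char) (t : List Char)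
    (h : old.isPrefixOf (c :: t) = true) :
    pvRep old new (c :: t) = new ++ pvRep old new (t.drop (old.length - 1)) := by
  rw [pvRep, if_pos h]

lemma pvRep_cons_neg (old new : List Char) (c : Char) (t : List Char)
    (h : old.isPrefixOf (c :: t) = false) :
    pvRep old new (c :: t) = c :: pvRep old new t := by
  rw [pvRep, if_neg (by simp [h])]

lemma pvScan_nil (T : List (List Char × List Char)) : pvScan T [] = [] := by
  rw [pvScan]

lemma pvScan_cons (T : List (List Char × List Char)) (c : Char) (rest : List Char) :
    pvScan T (c :: rest) =
      match T.find? (fun p => p.1.isPrefixOf (c :: rest)) with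
      | some q => q.2 ++ pvScan T (rest.drop (q.1.length - 1))
      | none => c :: pvScan T rest := by
  rw [pvScan]

lemma pvRSub_nil (T : List (List Char × List Char)) (S : List (List Char)) :
    pvRSub T S [] = [] := by
  rw [pvRSub]

lemma pvRSub_cons (T : List (List Char × List Char)) (S : List (List Char)) (c : Char)
    (rest : List Char) :
    pvRSub T S (c :: rest) =
      match T.find? (fun p => p.1.isPrefixOf (c :: rest)) with
      | some q => (if q.1 ∈ S then q.2 else q.1) ++ pvRSub T S (rest.drop (q.1.length - 1))
      | none => c :: pvRSub T S rest := by
  rw [pvRSub]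

-- If `a` and `b` are incomparable, `b` cannot start at the beginning of `a ++ rest`.
lemma pvIncomp_no_cross (a b rest : List Char) (h : pvIncomp a b = true) :
    b.isPrefixOf (a ++ rest) = false := by
  simp only [pvIncomp, Bool.and_eq_true, Bool.not_eq_true'] at h
  by_contra hb
  have hb' : b <+: a ++ rest := List.isPrefixOf_iff_prefix.mp (by
    cases hpre : b.isPrefixOf (a ++ rest) with
    | true => rfl
    | false => exact absurd hpre hb)
  rcases List.prefix_or_prefix_of_prefix hb' (List.prefix_append a rest) with h1 | h1
  · rw [List.isPrefixOf_iff_prefix.mpr h1] at h; exact absurd h.2 (by simp)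
  · rw [List.isPrefixOf_iff_prefix.mpr h1] at h; exact absurd h.1 (by simp)

lemma pvRep_prefix (k v rest : List Char) (hk : k ≠ []) :
    pvRep k v (k ++ rest) = v ++ pvRep k v rest := by
  cases k with
  | nil => exact absurd rfl hk
  | cons c k' =>
    rw [List.cons_append, pvRep_cons_pos _ _ _ _ (List.isPrefixOf_iff_prefix.mpr ⟨rest, rfl⟩)]
    simp

-- Skip lemma: replacement of `k` walks unchanged over a piece none of whose nonempty
-- tails can begin an occurrence of `k`.
lemma pvRep_skip (k v : List Char) :
    ∀ (piece : List Char), (∀ s ∈ piece.tails, s ≠ [] → pvIncomp s k = true) →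
    ∀ rest, pvRep k v (piece ++ rest) = piece ++ pvRep k v rest := by
  intro piece
  induction piece with
  | nil => intro _ rest; simp
  | cons c p' ih =>
    intro h rest
    have hfull : pvIncomp (c :: p') k = true :=
      h (c :: p') ((List.mem_tails _ _).mpr (List.suffix_refl _)) (by simp)
    rw [List.cons_append, pvRep_cons_neg _ _ _ _ (by
      have := pvIncomp_no_cross (c :: p') k rest hfull
      simpa using this)]
    rw [ih (fun s hs hne => h s ((List.mem_tails _ _).mpr
      (((List.mem_tails _ _).mp hs).trans (List.suffix_cons c p'))) hne) rest]
    rfl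

-- A's `str.replace` (PySem) is exactly pvRep when `old` is nonempty.
lemma pvGo_eq (k v : List Char) (hk : k ≠ []) :
    ∀ (fuel : Nat) (l acc : List Char), l.length ≤ fuel →
      PySem.Chars.replace.go k v fuel l acc = acc.reverse ++ pvRep k v l := by
  intro fuel
  induction fuel with
  | zero =>
    intro l acc hl
    have : l = [] := by cases l with
      | nil => rfl
      | cons a b => simp at hl
    subst this
    simp [PySem.Chars.replace.go, pvRep_nil]
  | succ f ih =>
    intro l acc hl
    cases l with
    | nil => simp [PySem.Chars.replace.go, pvRep_nil]
    | cons c t =>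
      rw [PySem.Chars.replace.go]
      cases hpre : k.isPrefixOf (c :: t) with
      | true =>
        simp only [if_true]
        have hklen : 1 ≤ k.length := by
          cases k with
          | nil => exact absurd rfl hk
          | cons _ _ => simp
        have hdrop : (c :: t).drop k.length = t.drop (k.length - 1) := by
          cases k with
          | nil => exact absurd rfl hk
          | cons a b => simp
        have hlen : ((c :: t).drop k.length).length ≤ f := by
          simp only [List.length_drop, List.length_cons] at *
          omega
        rw [ih _ _ hlen, pvRep_cons_pos _ _ _ _ hpre, hdrop]
        simp
      | false =>
        simp only [Bool.false_eq_true, if_false]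
        have hlen : t.length ≤ f := by simp at hl; omega
        rw [ih _ _ hlen, pvRep_cons_neg _ _ _ _ hpre]
        simp

lemma pvReplace_eq (k v s : List Char) (hk : k ≠ []) :
    PySem.Chars.replace s k v = pvRep k v s := by
  have hke : k.isEmpty = false := by cases k with
    | nil => exact absurd rfl hk
    | cons _ _ => rfl
  rw [PySem.Chars.replace, hke]
  simpa using pvGo_eq k v hk s.length s [] le_rfl

-- Distinct keys identify entries.
lemma pvKeyInj : ∀ (T : List (List Char × List Char)),
    (T.map Prod.fst).Nodup → ∀ p ∈ T, ∀ q ∈ T, p.1 = q.1 → p = q := by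
  intro T
  induction T with
  | nil => intro _ p hp; simp at hp
  | cons a T ih =>
    intro hnd p hp q hq heq
    simp only [List.map_cons, List.nodup_cons] at hnd
    rcases List.mem_cons.mp hp with hp | hp <;> rcases List.mem_cons.mp hq with hq | hq
    · rw [hp, hq]
    · exfalso
      have : q.1 ∈ T.map Prod.fst := List.mem_map_of_mem hq
      rw [← heq, hp] at this
      exact hnd.1 this
    · exfalso
      have : p.1 ∈ T.map Prod.fst := List.mem_map_of_mem hp
      rw [heq, hq] at this
      exact hnd.1 this
    · exact ih hnd.2 p hp q hq heq

-- With no key selected, the generalized scan is the identity.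
lemma pvRSub_nilS (T : List (List Char × List Char)) (hne : ∀ p ∈ T, p.1 ≠ []) :
    ∀ (n : Nat) (cs : List Char), cs.length ≤ n → pvRSub T [] cs = cs := by
  intro n
  induction n with
  | zero =>
    intro cs h
    cases cs with
    | nil => exact pvRSub_nil T []
    | cons a b => simp at h
  | succ n ih =>
    intro cs h
    cases cs with
    | nil => exact pvRSub_nil T []
    | cons c rest =>
      rw [pvRSub_cons]
      cases hf : T.find? (fun p => p.1.isPrefixOf (c :: rest)) with
      | none => simp only []; rw [ih rest (by simp at h; omega)]
      | some q =>
        simp only [List.mem_nil_iff, if_neg (fun hmem => hmem)]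
        have hq : q ∈ T := List.mem_of_find?_eq_some hf
        have hpred : q.1.isPrefixOf (c :: rest) = true := by
          have := List.find?_some hf
          simpa using this
        have hpre : q.1 <+: (c :: rest) := List.isPrefixOf_iff_prefix.mp hpred
        rcases hpre with ⟨tl, htl⟩
        cases hq1 : q.1 with
        | nil => exact absurd hq1 (hne q hq)
        | cons a k' =>
          rw [hq1] at htl
          have hc : a = c := by injection htl
          have hrest : k' ++ tl = rest := by injection htl
          have hdrop : rest.drop ((a :: k').length - 1) = tl := by
            rw [← hrest]; simp
          rw [hdrop, ih tl (by
            have := congrArg List.length hrest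
            simp only [List.length_append] at this
            simp only [List.length_cons] at h
            omega)]
          rw [List.cons_append, hc, hrest]

-- With all keys selected, the generalized scan is B's scan.
lemma pvRSub_allS (T : List (List Char × List Char)) :
    ∀ (n : Nat) (cs : List Char), cs.length ≤ n →
      pvRSub T (T.map Prod.fst) cs = pvScan T cs := by
  intro n
  induction n with
  | zero =>
    intro cs h
    cases cs with
    | nil => rw [pvRSub_nil, pvScan_nil]
    | cons a b => simp at h
  | succ n ih =>
    intro cs h
    cases cs with
    | nil => rw [pvRSub_nil, pvScan_nil]
    | cons c rest =>
      rw [pvRSub_cons, pvScan_cons]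
      cases hf : T.find? (fun p => p.1.isPrefixOf (c :: rest)) with
      | none => simp only []; rw [ih rest (by simp at h; omega)]
      | some q =>
        have hq : q ∈ T := List.mem_of_find?_eq_some hf
        simp only [if_pos (List.mem_map_of_mem hq)]
        rw [ih _ (by simp only [List.length_drop, List.length_cons] at *; omega)]

lemma pvIncomp_comm (a b : List Char) : pvIncomp a b = pvIncomp b a := by
  simp [pvIncomp, Bool.and_comm]

lemma pvDropNe (k : List Char) (m : Nat) (hm : m < k.length) : k.drop m ≠ [] := by
  intro hd
  have := congrArg List.length hd
  simp only [List.length_drop, List.length_nil] at this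
  omega

lemma pvNonemptyPrefixNil (s : List Char) (hs : s ≠ []) : s.isPrefixOf ([] : List Char) = false := by
  cases s with
  | nil => exact absurd rfl hs
  | cons a b => simp [List.isPrefixOf]

-- Maximality of the scan: if key-tail `k.drop m` does not start at the head of `cs`,
-- it does not start at the head of the partially substituted `cs` either.
lemma pvNM (T : List (List Char × List Char)) (hg : pvGood T) (k : List Char)
    (hk : k ∈ T.map Prod.fst) :
    ∀ (n : Nat) (cs : List Char), cs.length ≤ n → ∀ (S : List (List Char)) (m : Nat),
      m < k.length → (k.drop m).isPrefixOf cs = false →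
      (k.drop m).isPrefixOf (pvRSub T S cs) = false := by
  intro n
  induction n with
  | zero =>
    intro cs hlen S m hm hnp
    cases cs with
    | nil => rw [pvRSub_nil]; exact pvNonemptyPrefixNil _ (pvDropNe k m hm)
    | cons a b => simp at hlen
  | succ n ih =>
    intro cs hlen S m hm hnp
    cases cs with
    | nil => rw [pvRSub_nil]; exact pvNonemptyPrefixNil _ (pvDropNe k m hm)
    | cons c rest =>
      rw [pvRSub_cons]
      cases hf : T.find? (fun p => p.1.isPrefixOf (c :: rest)) with
      | some q =>
        simp only []
        have hq : q ∈ T := List.mem_of_find?_eq_some hf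
        have hpred : q.1.isPrefixOf (c :: rest) = true := by
          have := List.find?_some hf; simpa using this
        have hpiece : ∀ piece ∈ T.map Prod.fst ++ T.map Prod.snd, (m = 0 → piece ≠ k) →
            (k.drop m).isPrefixOf (piece ++ pvRSub T S (rest.drop (q.1.length - 1))) = false := by
          intro piece hmem hpk0
          have hpk : m = 0 → piece ≠ k := hpk0
          by_cases hm0 : m = 0
          · subst hm0
            simp only [List.drop_zero]
            rcases hg.2.2.2.2.1 piece hmem piece
                ((List.mem_tails _ _).mpr (List.suffix_refl _))
                (by
                  rcases List.mem_append.mp hmem with h | h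
                  · rcases List.mem_map.mp h with ⟨p, hpT, hpe⟩
                    rw [← hpe]; exact hg.1 p hpT
                  · rcases List.mem_map.mp h with ⟨p, hpT, hpe⟩
                    rw [← hpe]; exact hg.2.1 p hpT)
                k hk with ⟨_, hxk⟩ | hic
            · exact absurd hxk (hpk rfl)
            · exact pvIncomp_no_cross piece k _ hic
          · have hs_mem : k.drop m ∈ k.tails := (List.mem_tails _ _).mpr (List.drop_suffix m k)
            have hic := hg.2.2.2.2.2 k hk (k.drop m) hs_mem (pvDropNe k m hm)
              (by
                intro hdk
                have := congrArg List.length hdk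
                simp only [List.length_drop] at this
                omega)
              piece hmem
            exact pvIncomp_no_cross piece (k.drop m) _ (by rw [pvIncomp_comm]; exact hic)
        by_cases hm0k : m = 0 ∧ q.1 = k
        · exfalso
          rcases hm0k with ⟨hm0, hqk⟩
          subst hm0
          rw [List.drop_zero, ← hqk, hpred] at hnp
          exact absurd hnp (by simp)
        · by_cases hqs : q.1 ∈ S
          · have hres := hpiece q.2 (List.mem_append_right _ (List.mem_map_of_mem hq))
              (fun _ => (hg.2.2.2.1 q.2 (List.mem_map_of_mem hq) k hk))
            rw [if_pos hqs]
            exact hres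
          · have hres := hpiece q.1 (List.mem_append_left _ (List.mem_map_of_mem hq))
              (fun hm0 hqk => hm0k ⟨hm0, hqk⟩)
            rw [if_neg hqs]
            exact hres
      | none =>
        simp only []
        by_contra hb
        have htrue : (k.drop m).isPrefixOf (c :: pvRSub T S rest) = true := by
          cases hx : (k.drop m).isPrefixOf (c :: pvRSub T S rest) with
          | true => rfl
          | false => exact absurd hx hb
        have hd : k.drop m = k[m] :: k.drop (m + 1) := List.drop_eq_getElem_cons hm
        rw [hd] at htrue hnp
        have htp : k[m] = c ∧ (k.drop (m + 1)) <+: pvRSub T S rest :=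
          List.cons_prefix_cons.mp (List.isPrefixOf_iff_prefix.mp htrue)
        by_cases hm1 : m + 1 < k.length
        · have hnp' : (k.drop (m + 1)).isPrefixOf rest = false := by
            cases hx : (k.drop (m + 1)).isPrefixOf rest with
            | false => rfl
            | true =>
              exfalso
              have : (k[m] :: k.drop (m + 1)).isPrefixOf (c :: rest) = true :=
                List.isPrefixOf_iff_prefix.mpr
                  (List.cons_prefix_cons.mpr ⟨htp.1, List.isPrefixOf_iff_prefix.mp hx⟩)
              rw [this] at hnp; exact absurd hnp (by simp)
          have := ih rest (by simp at hlen; omega) S (m + 1) hm1 hnp'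
          rw [List.isPrefixOf_iff_prefix.mpr htp.2] at this
          exact absurd this (by simp)
        · have hnil : k.drop (m + 1) = [] := by
            apply List.drop_eq_nil_of_le; omega
          rw [hnil, htp.1] at hnp
          simp [List.isPrefixOf] at hnp
-- One pass of A's `.replace` advances the processed-keys set of the generalized scan.
lemma pvStep (T : List (List Char × List Char)) (hg : pvGood T) (p : List Char × List Char)
    (hp : p ∈ T) :
    ∀ (n : Nat) (cs : List Char), cs.length ≤ n → ∀ (S : List (List Char)), p.1 ∉ S →
      pvRep p.1 p.2 (pvRSub T S cs) = pvRSub T (S ++ [p.1]) cs := by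
  have hkne : p.1 ≠ [] := hg.1 p hp
  have hkmem : p.1 ∈ T.map Prod.fst := List.mem_map_of_mem hp
  intro n
  induction n with
  | zero =>
    intro cs hlen S hns
    cases cs with
    | nil => rw [pvRSub_nil, pvRSub_nil, pvRep_nil]
    | cons a b => simp at hlen
  | succ n ih =>
    intro cs hlen S hns
    cases cs with
    | nil => rw [pvRSub_nil, pvRSub_nil, pvRep_nil]
    | cons c rest =>
      rw [pvRSub_cons T S, pvRSub_cons T (S ++ [p.1])]
      cases hf : T.find? (fun p => p.1.isPrefixOf (c :: rest)) with
      | some q =>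
        simp only []
        have hq : q ∈ T := List.mem_of_find?_eq_some hf
        have hlen' : (rest.drop (q.1.length - 1)).length ≤ n := by
          simp only [List.length_drop, List.length_cons] at *
          omega
        by_cases hqp : q.1 = p.1
        · have hqep : q = p := pvKeyInj T hg.2.2.1 q hq p hp hqp
          rw [if_neg (by rw [hqp]; exact hns), if_pos (by
            rw [hqp]; exact List.mem_append_right _ (List.mem_singleton.mpr rfl))]
          have hlen2 : (rest.drop (p.1.length - 1)).length ≤ n := by
            rw [← hqp]; exact hlen'
          rw [hqp, hqep, pvRep_prefix p.1 p.2 _ hkne, ih _ hlen2 S hns]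
        · have hskip : ∀ s ∈ (if q.1 ∈ S then q.2 else q.1).tails, s ≠ [] →
              pvIncomp s p.1 = true := by
            intro s hs hsne
            have hmem : (if q.1 ∈ S then q.2 else q.1) ∈ T.map Prod.fst ++ T.map Prod.snd := by
              by_cases hqs : q.1 ∈ S
              · rw [if_pos hqs]; exact List.mem_append_right _ (List.mem_map_of_mem hq)
              · rw [if_neg hqs]; exact List.mem_append_left _ (List.mem_map_of_mem hq)
            rcases hg.2.2.2.2.1 _ hmem s hs hsne p.1 hkmem with ⟨hsx, hxk⟩ | hic
            · exfalso
              by_cases hqs : q.1 ∈ S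
              · rw [if_pos hqs] at hxk
                exact hg.2.2.2.1 q.2 (List.mem_map_of_mem hq) p.1 hkmem hxk
              · rw [if_neg hqs] at hxk
                exact hqp hxk
            · exact hic
          rw [pvRep_skip p.1 p.2 _ hskip _, ih _ hlen' S hns]
          simp only [List.mem_append, List.mem_singleton, hqp, or_false]
      | none =>
        simp only []
        have hnp : p.1.isPrefixOf (c :: rest) = false := by
          have hall := List.find?_eq_none.mp hf p hp
          exact Bool.eq_false_iff.mpr (by simpa using hall)
        have hshape : pvRSub T S (c :: rest) = c :: pvRSub T S rest := by
          rw [pvRSub_cons, hf]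
        have hnm := pvNM T hg p.1 hkmem (n + 1) (c :: rest) hlen S 0
          (by cases hp1 : p.1 with
            | nil => exact absurd hp1 hkne
            | cons a b => simp)
          (by simpa using hnp)
        rw [List.drop_zero, hshape] at hnm
        rw [pvRep_cons_neg _ _ _ _ hnm, ih rest (by simp at hlen; omega) S hns]

-- Folding A's replaces over the whole table lands at the fully substituted scan.
lemma pvFold (T : List (List Char × List Char)) (hg : pvGood T) :
    ∀ (R Sdone : List (List Char × List Char)) (cs : List Char), Sdone ++ R = T →
      R.foldl (fun u p => pvRep p.1 p.2 u) (pvRSub T (Sdone.map Prod.fst) cs) =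
        pvRSub T (T.map Prod.fst) cs := by
  intro R
  induction R with
  | nil =>
    intro Sdone cs hST
    rw [List.append_nil] at hST
    rw [hST, List.foldl_nil]
  | cons p R' ih =>
    intro Sdone cs hST
    rw [List.foldl_cons]
    have hp : p ∈ T := by
      rw [← hST]; exact List.mem_append_right _ (List.mem_cons_self)
    have hnd : (T.map Prod.fst).Nodup := hg.2.2.1
    have hnot : p.1 ∉ Sdone.map Prod.fst := by
      rw [← hST, List.map_append, List.map_cons] at hnd
      rcases List.nodup_append.mp hnd with ⟨_, _, hdisj⟩
      intro hmem
      exact false_of_ne (hdisj p.1 hmem p.1 (List.mem_cons_self))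
    rw [pvStep T hg p hp cs.length cs le_rfl _ hnot]
    have : Sdone.map Prod.fst ++ [p.1] = (Sdone ++ [p]).map Prod.fst := by
      simp
    rw [this]
    exact ih (Sdone ++ [p]) cs (by rw [List.append_assoc]; exact hST)

lemma pvFoldRep (L : List (List Char × List Char)) (hne : ∀ p ∈ L, p.1 ≠ []) :
    ∀ u, L.foldl (fun u p => PySem.Chars.replace u p.1 p.2) u =
      L.foldl (fun u p => pvRep p.1 p.2 u) u := by
  induction L with
  | nil => intro u; rfl
  | cons p L' ih =>
    intro u
    rw [List.foldl_cons, List.foldl_cons,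
      pvReplace_eq p.1 p.2 u (hne p (List.mem_cons_self)),
      ih (fun q hq => hne q (List.mem_cons_of_mem p hq))]

-- The sequential replaces of A equal the one-pass scan of B, for any good table.
lemma pvMain (T : List (List Char × List Char)) (hg : pvGood T) (cs : List Char) :
    T.foldl (fun u p => PySem.Chars.replace u p.1 p.2) cs = pvScan T cs := by
  rw [pvFoldRep T hg.1 cs]
  have h0 : pvRSub T [] cs = cs := pvRSub_nilS T hg.1 cs.length cs le_rfl
  have hfold := pvFold T hg T [] cs rfl
  simp only [List.map_nil] at hfold
  rw [h0] at hfold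
  rw [hfold]
  exact pvRSub_allS T cs.length cs le_rfl

-- String-level fold reduces to the character-level fold.
lemma pvFoldStr (L : List (String × String)) :
    ∀ (cc : String),
      (L.foldl (fun u q => PySem.Str.replace u q.1 q.2) cc).toList =
        (L.map (fun q => (q.1.toList, q.2.toList))).foldl
          (fun u p => PySem.Chars.replace u p.1 p.2) cc.toList := by
  induction L with
  | nil => intro cc; rfl
  | cons q L' ih =>
    intro cc
    rw [List.foldl_cons, List.map_cons, List.foldl_cons, ih]
    simp [PySem.Str.replace]

set_option maxRecDepth 100000 in
set_option maxHeartbeats 4000000 in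
theorem pvGoodN : pvGood (pvTab pvTtN) := by unfold pvGood; decide

set_option maxRecDepth 100000 in
set_option maxHeartbeats 4000000 in
theorem pvGoodF : pvGood (pvTab pvTtF) := by unfold pvGood; decide

lemma pvBridge (L : List (String × String)) (Tb Tb' : List (List Char × List Char))
    (cc : String) (h1 : L.map (fun q => (q.1.toList, q.2.toList)) = Tb) (h3 : Tb' = Tb)
    (h2 : pvGood Tb) :
    L.foldl (fun u q => PySem.Str.replace u q.1 q.2) cc =
      String.ofList (pvScan Tb' cc.toList) := by
  apply String.toList_inj.mp
  rw [pvFoldStr, String.toList_ofList, h1, h3]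
  exact pvMain Tb h2 cc.toList
-- PROOFS2


-- ===== VERDICT (by name: the statement is the Claim_ definition above) =====
set_option maxRecDepth 100000 in
set_option maxHeartbeats 4000000 in
theorem run_detect_conventions_py_spec : Claim_equal_run_detect_conventions_py := by
  intro pc cc _
  unfold Spec_run_detect_conventions_py
  simp only [run_detect_conventions_py, run_detect_conventions_py_alt]
  cases hpy : PySem.Str.isIn "- **language(s):** python" (PySem.Str.lower pc) with
  | false => simp
  | true =>
    simp only [Bool.not_true, Bool.false_eq_true, if_false]
    cases hfa : PySem.Str.isIn "fastapi" (PySem.Str.lower pc) with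
    | false =>
      simp only [Bool.false_eq_true, if_false]
      exact pvBridge _ (pvTab pvTtN) _ cc (by decide) (by decide) pvGoodN
    | true =>
      simp only [if_true]
      exact pvBridge _ (pvTab pvTtF) _ cc (by decide) (by decide) pvGoodF
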